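-- pv_equiv track=rewrite | github.com/athahibatullah/piano-composition-genetic-algorithm | parameter_fitness_bass.py | hitung_durasi
-- ===== SOURCE A (Python) =====
-- def hitung_durasi(komposisi, anggota_birama, range_nada):
--     min_durasi = 1
--     max_durasi = 1
--     durasi_list = [1]
--     for i in range(anggota_birama):
--         if komposisi[i] == range_nada:
--             if i != anggota_birama-1 and komposisi[i] == range_nada:
--                 max_durasi = 4
--             elif max_durasi < 4:
--                 max_durasi = 2
--             if max_durasi not in durasi_list:
--                 durasi_list.append(max_durasi)
--     return min_durasi, max_durasi, durasi_list
-- ===== SOURCE B (Python) =====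
-- def hitung_durasi(komposisi, anggota_birama, range_nada):
--     # build the full match table (all indices evaluated, no short-circuit)
--     matches = [komposisi[i] == range_nada for i in range(anggota_birama)]
--     if any(matches[:-1]):
--         max_durasi = 4
--     elif matches and matches[-1]:
--         max_durasi = 2
--     else:
--         max_durasi = 1
--     durasi_list = [1] if max_durasi == 1 else [1, max_durasi]
--     return 1, max_durasi, durasi_list
-- ===== Notes on version B (the rewrite author's own statement) =====
-- stated objective: simpler
-- what changed: B builds a boolean match table for all indices once, derives max_durasi from whether any match lies before the last index (or only at it), and constructs durasi_list in one step at the end, instead of A's loop mutating max/list state with membership tests.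
import Mathlib
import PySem

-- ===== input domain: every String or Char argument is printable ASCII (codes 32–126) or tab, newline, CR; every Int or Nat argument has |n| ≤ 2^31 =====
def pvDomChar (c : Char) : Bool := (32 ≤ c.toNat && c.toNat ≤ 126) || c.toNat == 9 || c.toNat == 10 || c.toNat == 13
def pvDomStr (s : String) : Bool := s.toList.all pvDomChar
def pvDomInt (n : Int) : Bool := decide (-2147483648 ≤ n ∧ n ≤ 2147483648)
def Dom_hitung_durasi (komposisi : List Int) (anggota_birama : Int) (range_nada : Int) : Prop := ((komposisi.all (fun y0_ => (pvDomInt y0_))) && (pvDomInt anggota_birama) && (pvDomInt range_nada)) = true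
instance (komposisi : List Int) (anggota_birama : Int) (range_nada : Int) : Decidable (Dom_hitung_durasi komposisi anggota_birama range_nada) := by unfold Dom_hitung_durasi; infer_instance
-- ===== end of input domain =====

-- B derives max_durasi and the list once from a match table instead of growing them as loop state (objective: simpler).


-- ===== PORT A =====
def hitung_durasi (komposisi : List Int) (anggota_birama : Int) (range_nada : Int) : Int × Int × List Int :=
  let st := (PySem.List.pyRange 0 anggota_birama 1).foldl
    (fun (st : Int × List Int) i =>
      if PySem.List.pyGetD komposisi i 0 = range_nada then
        let m : Int :=
          if i ≠ anggota_birama - 1 ∧ PySem.List.pyGetD komposisi i 0 = range_nada then 4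
          else if st.1 < 4 then 2 else st.1
        (m, if m ∉ st.2 then st.2 ++ [m] else st.2)
      else st)
    (1, [1])
  (1, st.1, st.2)

-- ===== PORT B =====
def hitung_durasi_alt (komposisi : List Int) (anggota_birama : Int) (range_nada : Int) : Int × Int × List Int :=
  let tbl := (PySem.List.pyRange 0 anggota_birama 1).map
    (fun i => decide (PySem.List.pyGetD komposisi i 0 = range_nada))
  let max_durasi : Int :=
    if tbl.dropLast.any id then 4
    else if !tbl.isEmpty && tbl.getLastD false then 2
    else 1
  (1, max_durasi, if max_durasi = 1 then [1] else [1, max_durasi])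

-- ===== PRECONDITION & SPEC =====
-- Pre_ excludes exactly the inputs where A raises IndexError: anggota_birama exceeding len(komposisi).
def Pre_hitung_durasi (komposisi : List Int) (anggota_birama : Int) (range_nada : Int) : Prop :=
  anggota_birama ≤ (komposisi.length : Int)
instance (komposisi : List Int) (anggota_birama : Int) (range_nada : Int) : Decidable (Pre_hitung_durasi komposisi anggota_birama range_nada) := by unfold Pre_hitung_durasi; infer_instance

def pvWitness_hitung_durasi : List Int × Int × Int := ([5, 7, 5], 3, 5)

def Spec_hitung_durasi (komposisi : List Int) (anggota_birama : Int) (range_nada : Int) (out : Int × Int × List Int) : Prop := out = hitung_durasi_alt komposisi anggota_birama range_nada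
instance (komposisi : List Int) (anggota_birama : Int) (range_nada : Int) (out : Int × Int × List Int) : Decidable (Spec_hitung_durasi komposisi anggota_birama range_nada out) := by unfold Spec_hitung_durasi; infer_instance

-- ===== CLAIM (what is proved, stated in full; the proofs are below) =====
def Claim_equal_hitung_durasi : Prop := ∀ (komposisi : List Int) (anggota_birama : Int) (range_nada : Int), Dom_hitung_durasi komposisi anggota_birama range_nada → Pre_hitung_durasi komposisi anggota_birama range_nada → Spec_hitung_durasi komposisi anggota_birama range_nada (hitung_durasi komposisi anggota_birama range_nada)

-- ===== LEMMAS AND PROOFS =====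

-- A's loop over the first j indices (j ≤ k, the total count): the accumulated state is
-- determined by whether some match occurs at an index ≠ k-1 (→ 4) or any match at all (→ 2).
lemma loopA_inv (xs : List Int) (r : Int) (k : Nat) (j : Nat) (hj : j ≤ k) :
    (List.range j).foldl
      (fun (st : Int × List Int) (i : Nat) =>
        if xs.getD i 0 = r then
          let m : Int :=
            if (i : Int) ≠ (k : Int) - 1 ∧ xs.getD i 0 = r then 4
            else if st.1 < 4 then 2 else st.1
          (m, if m ∉ st.2 then st.2 ++ [m] else st.2)
        else st)
      (1, [1])
    =
    (if (List.range j).any (fun i => decide (i ≠ k - 1) && decide (xs.getD i 0 = r)) then (4 : Int)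
     else if (List.range j).any (fun i => decide (xs.getD i 0 = r)) then 2 else 1,
     if (List.range j).any (fun i => decide (i ≠ k - 1) && decide (xs.getD i 0 = r)) then [1, 4]
     else if (List.range j).any (fun i => decide (xs.getD i 0 = r)) then [1, 2] else [1]) := by
  induction j with
  | zero => simp
  | succ j ih =>
    have hA : ((List.range j).any (fun i => decide (xs.getD i 0 = r)))
            = ((List.range j).any (fun i => decide (i ≠ k - 1) && decide (xs.getD i 0 = r))) := by
      apply Bool.eq_iff_iff.mpr
      simp only [List.any_eq_true, List.mem_range, decide_eq_true_eq, Bool.and_eq_true]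
      constructor
      · rintro ⟨i, hi, hpi⟩; exact ⟨i, hi, by omega, hpi⟩
      · rintro ⟨i, hi, _, hpi⟩; exact ⟨i, hi, hpi⟩
    rw [List.range_succ, List.foldl_append, List.any_append, List.any_append, ih (by omega)]
    simp only [List.foldl_cons, List.foldl_nil, List.any_cons, List.any_nil, Bool.or_false, ← hA]
    by_cases hp : xs[j]?.getD 0 = r
    · by_cases hne : (j : Int) ≠ (k : Int) - 1
      · have hne' : j ≠ k - 1 := by omega
        cases h2 : (List.range j).any (fun i => decide (xs.getD i 0 = r)) <;>
          simp [List.getD, hp, hne, hne']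
      · have hne' : ¬ (j ≠ k - 1) := by omega
        cases h2 : (List.range j).any (fun i => decide (xs.getD i 0 = r)) <;>
          simp [List.getD, hp, hne, hne']
    · cases h2 : (List.range j).any (fun i => decide (xs.getD i 0 = r)) <;>
        simp [List.getD, hp]

lemma dropLast_range (k : Nat) : (List.range k).dropLast = List.range (k - 1) := by
  cases k with
  | zero => simp
  | succ k => rw [List.range_succ, List.dropLast_concat]; simp

theorem hitung_durasi_spec : Claim_equal_hitung_durasi := by
  intro xs n r _ hpre
  unfold Spec_hitung_durasi hitung_durasi hitung_durasi_alt
  by_cases hn : n ≤ 0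
  · rw [PySem.List.pyRange_one_eq_nil hn]; simp
  · lift n to Nat using (by omega : (0:Int) ≤ n) with k
    rw [PySem.List.pyRange_one]
    simp only [sub_zero, Int.toNat_natCast, zero_add, List.foldl_map, List.map_map,
      Function.comp_def, PySem.List.pyGetD_natCast]
    rw [loopA_inv xs r k k le_rfl]
    have hk1 : 1 ≤ k := by omega
    have hdrop : (((List.range k).map (fun i => decide (xs.getD i 0 = r))).dropLast.any id)
        = ((List.range k).any (fun i => decide (i ≠ k - 1) && decide (xs.getD i 0 = r))) := by
      rw [← List.map_dropLast, dropLast_range, List.any_map]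
      apply Bool.eq_iff_iff.mpr
      simp only [List.any_eq_true, List.mem_range, Function.comp_def, decide_eq_true_eq,
        Bool.and_eq_true, id]
      constructor
      · rintro ⟨i, hi, hpi⟩; exact ⟨i, by omega, by omega, hpi⟩
      · rintro ⟨i, hi, hne, hpi⟩; exact ⟨i, by omega, hpi⟩
    have hlast : ((List.range k).map (fun i => decide (xs.getD i 0 = r))).getLastD false
        = decide (xs.getD (k - 1) 0 = r) := by
      conv_lhs => rw [show k = (k - 1) + 1 by omega, List.range_succ]
      rw [List.map_append]
      simp
    have hnemp : ((List.range k).map (fun i => decide (xs.getD i 0 = r))).isEmpty = false := by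
      simp
      omega
    simp only [hdrop, hlast, hnemp, Bool.not_false, Bool.true_and]
    cases h4 : (List.range k).any (fun i => decide (i ≠ k - 1) && decide (xs.getD i 0 = r))
    · have h2 : ((List.range k).any (fun i => decide (xs.getD i 0 = r)))
          = decide (xs.getD (k - 1) 0 = r) := by
        apply Bool.eq_iff_iff.mpr
        simp only [List.any_eq_true, List.mem_range, decide_eq_true_eq]
        constructor
        · rintro ⟨i, hi, hpi⟩
          by_cases hik : i = k - 1
          · subst hik; exact hpi
          · exfalso
            have hcontra : (List.range k).any
                (fun i => decide (i ≠ k - 1) && decide (xs.getD i 0 = r)) = true := by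
              simp only [List.any_eq_true, List.mem_range, decide_eq_true_eq, Bool.and_eq_true]
              exact ⟨i, hi, hik, hpi⟩
            rw [h4] at hcontra; exact Bool.false_ne_true hcontra
        · intro hpk; exact ⟨k - 1, by omega, hpk⟩
      simp only [h2]
      by_cases hpk : xs[k - 1]?.getD 0 = r <;> simp [hpk]
    · simp
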